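-- pv_equiv track=rewrite | github.com/Darional/Data-Analysis-and-Python-Library-Codes | optimizations/string_partition.py | string_partition
-- ===== SOURCE A (Python) =====
-- def string_partition(s):
--     last_appearance = {}  # has the last position of each word
--
--     # Search the last time when the char appear in the string
--     for index, char in enumerate(s):
--         last_appearance[char] = index
--     # When the lenght
--     result = []
--     end = 0
--     start = 0
--     for i in range(len(s)):
--          end = max(end, last_appearance[s[i]])
--          if i == end:
--               result.append(len(s[start:i + 1]))
--               start = i + 1
--     return result
-- ===== SOURCE B (Python) =====
-- def string_partition(s):
--     # Cut boundaries are exactly those positions where no character crosses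
--     # the prefix/suffix divide; the result is the gaps between boundaries.
--     n = len(s)
--     cuts = [i for i in range(1, n + 1) if not set(s[:i]) & set(s[i:])]
--     return [b - a for a, b in zip([0] + cuts, cuts)]
-- ===== Notes on version B (the rewrite author's own statement) =====
-- stated objective: alternative
-- what changed: Replaces A's stateful greedy scan (running max of last occurrences with start/end accumulators) by a declarative characterisation: cut boundaries are exactly the positions where prefix and suffix share no character, collected by a comprehension and turned into lengths by differencing consecutive boundaries.
import Mathlib
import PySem

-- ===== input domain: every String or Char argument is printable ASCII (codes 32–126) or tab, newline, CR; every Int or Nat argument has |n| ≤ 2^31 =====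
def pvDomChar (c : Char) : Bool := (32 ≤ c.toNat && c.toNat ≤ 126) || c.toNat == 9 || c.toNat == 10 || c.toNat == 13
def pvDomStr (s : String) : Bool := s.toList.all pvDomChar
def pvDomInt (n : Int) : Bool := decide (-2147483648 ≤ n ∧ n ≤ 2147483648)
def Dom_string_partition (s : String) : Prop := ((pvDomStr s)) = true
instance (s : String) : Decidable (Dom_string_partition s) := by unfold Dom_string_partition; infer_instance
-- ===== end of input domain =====

-- B replaces A's greedy running-max scan by a declarative characterisation: cut
-- boundaries are the positions where the prefix and suffix share no character,
-- and the lengths are the gaps between consecutive boundaries (objective: alternative).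

-- ===== PORT A =====
def string_partition (s : String) : List Int :=
  let l := s.toList
  -- last_appearance = {}; for index, char in enumerate(s): last_appearance[char] = index
  let last := (PySem.List.enumerate l 0).foldl
      (fun (d : PySem.Dict Char Int) p => d.insert p.2 p.1) PySem.Dict.empty
  -- result = []; end = 0; start = 0; for i in range(len(s)): ...
  let st := (PySem.List.pyRange 0 (l.length : Int) 1).foldl
      (fun (st : List Int × Int × Int) i =>
        let c := (PySem.List.pyGet? l i).getD ' '   -- s[i]: i is always in range here
        let e := max st.2.1 (last.getD c 0)         -- key always present: no KeyError
        if i == e then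
          (st.1 ++ [((PySem.List.slice l (some st.2.2) (some (i+1))).length : Int)], e, i + 1)
        else (st.1, e, st.2.2))
      ([], 0, 0)
  st.1

-- ===== PORT B =====
def string_partition_alt (s : String) : List Int :=
  let l := s.toList
  let n := l.length
  -- cuts = [i for i in range(1, n + 1) if not set(s[:i]) & set(s[i:])]
  let cuts := (PySem.List.pyRange 1 ((n : Int)+1) 1).filter
      (fun i => (PySem.Set.inter (PySem.Set.ofList (PySem.List.slice l none (some i)))
                                 (PySem.Set.ofList (PySem.List.slice l (some i) none))).isEmpty)
  -- [b - a for a, b in zip([0] + cuts, cuts)]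
  (((0 : Int) :: cuts).zip cuts).map (fun p => p.2 - p.1)

-- ===== PRECONDITION & SPEC =====
def Spec_string_partition (s : String) (out : List Int) : Prop := out = string_partition_alt s
instance (s : String) (out : List Int) : Decidable (Spec_string_partition s out) := by unfold Spec_string_partition; infer_instance

-- ===== CLAIM (what is proved, stated in full; the proofs are below) =====
def Claim_equal_string_partition : Prop := ∀ (s : String), Dom_string_partition s → Spec_string_partition s (string_partition s)

-- ===== LEMMAS AND PROOFS =====

-- index of the LAST occurrence of c in l (meaningful when c ∈ l)
def lastIdx : List Char → Char → Nat
  | [], _ => 0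
  | _ :: t, c => if c ∈ t then lastIdx t c + 1 else 0

-- successive differences: diffs p [c1, c2, ...] = [c1 - p, c2 - c1, ...]
def diffs (p : Int) : List Int → List Int
  | [] => []
  | c :: t => (c - p) :: diffs c t

def dictOf (l : List Char) : PySem.Dict Char Int :=
  (PySem.List.enumerate l 0).foldl (fun (d : PySem.Dict Char Int) p => d.insert p.2 p.1) PySem.Dict.empty

-- B's boundary test at position i
def bcond (l : List Char) (i : Int) : Bool :=
  (PySem.Set.inter (PySem.Set.ofList (PySem.List.slice l none (some i)))
                   (PySem.Set.ofList (PySem.List.slice l (some i) none))).isEmpty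

def cutsTo (l : List Char) (m : Nat) : List Int :=
  (PySem.List.pyRange 1 ((m : Int)+1) 1).filter (bcond l)

-- the running maximum A's loop maintains after m steps
def runMax (l : List Char) (m : Nat) : Int :=
  ((l.take m).map (fun c => (dictOf l).getD c 0)).foldl (fun a x => max a x) 0

theorem zip_diffs (p : Int) (cs : List Int) :
    ((p :: cs).zip cs).map (fun q => q.2 - q.1) = diffs p cs := by
  induction cs generalizing p with
  | nil => rfl
  | cons c t ih => simp [List.zip_cons_cons, diffs, ih]

theorem diffs_append (p : Int) (cs : List Int) (b : Int) :
    diffs p (cs ++ [b]) = diffs p cs ++ [b - cs.getLastD p] := by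
  induction cs generalizing p with
  | nil => rfl
  | cons c t ih =>
    simp only [List.cons_append, diffs, ih, List.getLastD_cons]

theorem dict_getD (l : List Char) (d : PySem.Dict Char Int) (off : Int) (c : Char) :
    ((PySem.List.enumerate l off).foldl (fun (d : PySem.Dict Char Int) p => d.insert p.2 p.1) d).getD c 0
      = if c ∈ l then off + (lastIdx l c : Int) else d.getD c 0 := by
  induction l generalizing d off with
  | nil => simp [PySem.List.enumerate_nil]
  | cons a t ih =>
    rw [PySem.List.enumerate_cons]
    simp only [List.foldl_cons, ih]
    by_cases ht : c ∈ t
    · simp [ht, lastIdx]; push_cast; ring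
    · by_cases hac : c = a
      · subst hac
        simp [ht, lastIdx, PySem.Dict.getD_insert_self]
      · simp [ht, hac, lastIdx, PySem.Dict.getD_insert_of_ne _ _ _ hac]

theorem lastIdx_lt (l : List Char) (c : Char) (h : c ∈ l) : lastIdx l c < l.length := by
  induction l with
  | nil => simp at h
  | cons a t ih =>
    by_cases ht : c ∈ t
    · simp [lastIdx, ht]; exact ih ht
    · simp [lastIdx, ht]

theorem getElem_lastIdx (l : List Char) (c : Char) (h : c ∈ l) :
    l[lastIdx l c]'(lastIdx_lt l c h) = c := by
  induction l with
  | nil => simp at h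
  | cons a t ih =>
    by_cases ht : c ∈ t
    · simp [lastIdx, ht]; exact ih ht
    · have hca : c = a := by rcases List.mem_cons.1 h with h1 | h2; exact h1; exact absurd h2 ht
      subst hca
      simp [lastIdx, ht]

theorem le_lastIdx (l : List Char) (c : Char) (j : Nat) (hj : j < l.length) (hc : l[j] = c) :
    j ≤ lastIdx l c := by
  induction l generalizing j with
  | nil => simp at hj
  | cons a t ih =>
    cases j with
    | zero => exact Nat.zero_le _
    | succ k =>
      have hk : k < t.length := by simpa using hj
      have : t[k] = c := by simpa using hc
      have hmem : c ∈ t := this ▸ List.getElem_mem hk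
      simp [lastIdx, hmem]
      exact ih k hk this

theorem mem_take_iff_idx (l : List Char) (k : Nat) (c : Char) :
    c ∈ l.take k ↔ ∃ j, ∃ _ : j < l.length, j < k ∧ l[j] = c := by
  constructor
  · intro h
    rcases List.mem_iff_getElem.1 h with ⟨j, hj, hc⟩
    have hjl : j < l.length := by
      have := hj; simp [List.length_take] at this; omega
    have hjk : j < k := by
      have := hj; simp [List.length_take] at this; omega
    exact ⟨j, hjl, hjk, by simpa [List.getElem_take] using hc⟩
  · rintro ⟨j, hjl, hjk, hc⟩
    apply List.mem_iff_getElem.2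
    refine ⟨j, by simp [List.length_take]; omega, ?_⟩
    simpa [List.getElem_take] using hc

theorem mem_drop_iff_idx (l : List Char) (k : Nat) (c : Char) :
    c ∈ l.drop k ↔ ∃ j, ∃ _ : j < l.length, k ≤ j ∧ l[j] = c := by
  constructor
  · intro h
    rcases List.mem_iff_getElem.1 h with ⟨j, hj, hc⟩
    have hjl : k + j < l.length := by simp [List.length_drop] at hj; omega
    exact ⟨k + j, hjl, by omega, by simpa [List.getElem_drop] using hc⟩
  · rintro ⟨j, hjl, hjk, hc⟩
    apply List.mem_iff_getElem.2
    refine ⟨j - k, by simp [List.length_drop]; omega, ?_⟩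
    have : k + (j - k) = j := by omega
    simp [List.getElem_drop, this, hc]

-- B's boundary test, in terms of last occurrences
theorem bcond_iff (l : List Char) (m : Nat) (hm : m < l.length) :
    bcond l ((m : Int) + 1) = true ↔
      ∀ j, ∀ _ : j < l.length, j ≤ m → lastIdx l l[j] ≤ m := by
  have hcast : ((m : Int) + 1) = ((m + 1 : Nat) : Int) := by push_cast; ring
  rw [bcond, hcast, PySem.List.slice_to_natCast, PySem.List.slice_from_natCast]
  rw [List.isEmpty_iff, List.eq_nil_iff_forall_not_mem]
  constructor
  · intro h j hj hjm
    by_contra hlast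
    have hLlt := lastIdx_lt l (l[j]) (List.getElem_mem hj)
    apply h l[j]
    rw [PySem.Set.mem_inter, PySem.Set.mem_ofList, PySem.Set.mem_ofList]
    constructor
    · exact (mem_take_iff_idx l (m+1) _).2 ⟨j, hj, by omega, rfl⟩
    · exact (mem_drop_iff_idx l (m+1) _).2 ⟨lastIdx l l[j], hLlt, by omega, getElem_lastIdx l _ (List.getElem_mem hj)⟩
  · intro h c hc
    rw [PySem.Set.mem_inter, PySem.Set.mem_ofList, PySem.Set.mem_ofList] at hc
    rcases hc with ⟨h1, h2⟩
    rcases (mem_take_iff_idx l (m+1) c).1 h1 with ⟨j, hj, hjm, hcj⟩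
    rcases (mem_drop_iff_idx l (m+1) c).1 h2 with ⟨j', hj', hj'm, hcj'⟩
    have := le_lastIdx l c j' hj' hcj'
    have := h j hj (by omega)
    rw [hcj] at this
    omega

theorem foldl_max_le_iff (xs : List Int) (a b : Int) :
    xs.foldl (fun x y => max x y) a ≤ b ↔ a ≤ b ∧ ∀ x ∈ xs, x ≤ b := by
  induction xs generalizing a with
  | nil => simp
  | cons x t ih =>
    simp only [List.foldl_cons, ih, List.mem_cons]
    constructor
    · rintro ⟨h1, h2⟩
      exact ⟨le_trans (le_max_left _ _) h1, fun y hy => by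
        rcases hy with rfl | hy
        · exact le_trans (le_max_right _ _) h1
        · exact h2 y hy⟩
    · rintro ⟨h1, h2⟩
      exact ⟨max_le h1 (h2 x (Or.inl rfl)), fun y hy => h2 y (Or.inr hy)⟩

theorem runMax_succ (l : List Char) (m : Nat) (hm : m < l.length) :
    runMax l (m + 1) = max (runMax l m) ((dictOf l).getD l[m] 0) := by
  have ht : l.take (m+1) = l.take m ++ [l[m]] := by
    rw [List.take_succ, List.getElem?_eq_getElem hm]; rfl
  rw [runMax, runMax, ht, List.map_append, List.foldl_append]
  simp

theorem getD_dictOf (l : List Char) (c : Char) (h : c ∈ l) :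
    (dictOf l).getD c 0 = (lastIdx l c : Int) := by
  rw [dictOf, dict_getD]
  simp [h]

-- runMax l m ≤ b iff every last occurrence of a char seen before m is ≤ b (for 0 ≤ b)
theorem runMax_le_iff (l : List Char) (m : Nat) (hm : m ≤ l.length) (b : Int) (hb : 0 ≤ b) :
    runMax l m ≤ b ↔ ∀ j, ∀ _ : j < l.length, j < m → (lastIdx l l[j] : Int) ≤ b := by
  rw [runMax, foldl_max_le_iff]
  constructor
  · rintro ⟨_, h⟩ j hj hjm
    have : (dictOf l).getD l[j] 0 ≤ b := by
      apply h
      exact List.mem_map.2 ⟨l[j], (mem_take_iff_idx l m _).2 ⟨j, hj, hjm, rfl⟩, rfl⟩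
    rwa [getD_dictOf l _ (List.getElem_mem hj)] at this
  · intro h
    refine ⟨hb, fun x hx => ?_⟩
    rcases List.mem_map.1 hx with ⟨c, hc, rfl⟩
    rcases (mem_take_iff_idx l m c).1 hc with ⟨j, hj, hjm, rfl⟩
    rw [getD_dictOf l _ (List.getElem_mem hj)]
    exact h j hj hjm

theorem runMax_nonneg (l : List Char) (m : Nat) : 0 ≤ runMax l m := by
  rw [runMax]
  exact ((foldl_max_le_iff _ 0 _).1 le_rfl).1

theorem le_runMax_self (l : List Char) (m : Nat) (hm : m < l.length) :
    (m : Int) ≤ runMax l (m + 1) := by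
  by_contra h
  push_neg at h
  have h0 : 0 ≤ runMax l (m + 1) := runMax_nonneg l (m + 1)
  have hmle : runMax l (m+1) ≤ (m : Int) - 1 := by omega
  have h2 := (runMax_le_iff l (m+1) (by omega) ((m : Int) - 1) (by omega)).1 hmle m hm (by omega)
  have h3 := le_lastIdx l l[m] m hm rfl
  omega

theorem cond_iff_bcond (l : List Char) (m : Nat) (hm : m < l.length) :
    ((m : Int) = runMax l (m + 1)) ↔ bcond l ((m : Int) + 1) = true := by
  rw [bcond_iff l m hm]
  constructor
  · intro h j hj hjm
    have := (runMax_le_iff l (m+1) (by omega) (m : Int) (by positivity)).1 (by omega) j hj (by omega)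
    exact_mod_cast this
  · intro h
    have hle := (runMax_le_iff l (m+1) (by omega) (m : Int) (by positivity)).2
      (fun j hj hjm => by exact_mod_cast h j hj (by omega))
    have hge := le_runMax_self l m hm
    omega

theorem cutsTo_succ (l : List Char) (m : Nat) :
    cutsTo l (m + 1) = cutsTo l m ++ if bcond l ((m : Int) + 1) then [(m : Int) + 1] else [] := by
  rw [cutsTo, cutsTo]
  have h1 : ((m + 1 : Nat) : Int) + 1 = ((m : Int) + 1) + 1 := by push_cast; ring
  rw [h1, PySem.List.pyRange_one_succ_right (by omega), List.filter_append]
  congr 1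
  cases hbc : bcond l ((m : Int) + 1) <;> simp [List.filter, hbc]

theorem cutsTo_mem_bounds (l : List Char) (m : Nat) :
    ∀ x ∈ cutsTo l m, 1 ≤ x ∧ x ≤ (m : Int) := by
  intro x hx
  have h := (List.mem_filter.1 hx).1
  rw [PySem.List.mem_pyRange_one] at h
  omega

theorem getLastD_cutsTo_bounds (l : List Char) (m : Nat) :
    0 ≤ (cutsTo l m).getLastD 0 ∧ (cutsTo l m).getLastD 0 ≤ (m : Int) := by
  by_cases hne : cutsTo l m = []
  · simp [hne]
  · have heq : (cutsTo l m).getLastD 0 = (cutsTo l m).getLast hne := by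
      rw [List.getLastD_eq_getLast?, List.getLast?_eq_some_getLast hne]
      rfl
    rw [heq]
    have := cutsTo_mem_bounds l m _ (List.getLast_mem hne)
    exact ⟨by omega, by omega⟩

theorem slice_len_int (l : List Char) (a : Int) (m : Nat) (ha0 : 0 ≤ a)
    (ham : a ≤ (m : Int)) (hm : m < l.length) :
    ((PySem.List.slice l (some a) (some ((m : Int) + 1))).length : Int) = (m : Int) + 1 - a := by
  rw [PySem.List.slice_toNat l ha0 (by omega)]
  simp only [List.length_take, List.length_drop]
  omega

theorem loop_invariant (l : List Char) (m : Nat) (hm : m ≤ l.length) :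
    ((PySem.List.pyRange 0 ((m : Nat) : Int) 1).foldl
      (fun (st : List Int × Int × Int) i =>
        let c := (PySem.List.pyGet? l i).getD ' '
        let e := max st.2.1 ((dictOf l).getD c 0)
        if i == e then
          (st.1 ++ [((PySem.List.slice l (some st.2.2) (some (i+1))).length : Int)], e, i + 1)
        else (st.1, e, st.2.2))
      ([], 0, 0))
    = (diffs 0 (cutsTo l m), runMax l m, (cutsTo l m).getLastD 0) := by
  induction m with
  | zero =>
    rw [show ((0 : Nat) : Int) = 0 by simp, PySem.List.pyRange_one_eq_nil (by omega)]
    simp [cutsTo, runMax, diffs, PySem.List.pyRange_one_eq_nil]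
  | succ m ih =>
    have hml : m < l.length := by omega
    have hrange : PySem.List.pyRange 0 ((m + 1 : Nat) : Int) 1
        = PySem.List.pyRange 0 ((m : Nat) : Int) 1 ++ [(m : Int)] := by
      have h1 : ((m + 1 : Nat) : Int) = ((m : Nat) : Int) + 1 := by push_cast; ring
      rw [h1, PySem.List.pyRange_one_succ_right (by omega)]
    rw [hrange, List.foldl_append, ih (by omega), List.foldl_cons, List.foldl_nil]
    simp only [PySem.List.pyGet?_natCast, List.getElem?_eq_getElem hml, Option.getD_some]
    rw [← runMax_succ l m hml]
    by_cases hc : (m : Int) = runMax l (m + 1)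
    · have hb : bcond l ((m : Int) + 1) = true := (cond_iff_bcond l m hml).1 hc
      rw [if_pos (by simpa using hc)]
      have hbounds := getLastD_cutsTo_bounds l m
      rw [slice_len_int l _ m hbounds.1 hbounds.2 hml]
      rw [cutsTo_succ l m, hb, if_pos rfl, diffs_append, List.getLastD_concat]
    · have hb : bcond l ((m : Int) + 1) = false := by
        rcases Bool.eq_false_or_eq_true (bcond l ((m : Int) + 1)) with h | h
        · exact absurd ((cond_iff_bcond l m hml).2 h) hc
        · exact h
      rw [if_neg (by simpa using hc)]
      rw [cutsTo_succ l m, hb]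
      simp

theorem alt_eq_diffs (s : String) :
    string_partition_alt s = diffs 0 (cutsTo s.toList s.toList.length) := by
  rw [string_partition_alt]
  rw [zip_diffs]
  rfl

theorem a_eq_diffs (s : String) :
    string_partition s = diffs 0 (cutsTo s.toList s.toList.length) := by
  have h := loop_invariant s.toList s.toList.length le_rfl
  rw [string_partition]
  have hd : (PySem.List.enumerate s.toList 0).foldl
      (fun (d : PySem.Dict Char Int) p => d.insert p.2 p.1) PySem.Dict.empty = dictOf s.toList := rfl
  rw [hd, h]

-- ===== VERDICT (by name: the statement is the Claim_ definition above) =====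
theorem string_partition_spec : Claim_equal_string_partition := by
  intro s _
  show string_partition s = string_partition_alt s
  rw [a_eq_diffs, alt_eq_diffs]
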